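-- pv_equiv track=rewrite | github.com/pypi-data/pypi-mirror-202 | packages/ezQgd/ezQgd-0.0.0.3-py3-none-any.whl/ezQgd.py | readout_data_to_state_probabilities
-- ===== SOURCE A (Python) =====
-- def readout_data_to_state_probabilities(result):
--     '''
--         circuit: 线路
--         result: 原始数据
--     '''
--     state01 = result.get('resultStatus')
--     basis_list = []
--     basis_content = ''.join([''.join([str(s) for s in state]) for state in state01[1:]])
--     qubits_num = len(state01[0])  # 测量比特个数
--     for idx in range(qubits_num):
--         basis_result = basis_content[idx: len(basis_content): qubits_num]
--         basis_list.append([True if res == "1" else False for res in basis_result])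
--     return basis_list
-- ===== SOURCE B (Python) =====
-- def readout_data_to_state_probabilities(result):
--     state01 = result.get('resultStatus')
--     qubits_num = len(state01[0])
--     basis_content = ''.join(str(s) for row in state01[1:] for s in row)
--     groups = {}
--     if qubits_num:
--         for i, ch in enumerate(basis_content):
--             groups.setdefault(i % qubits_num, []).append(ch == '1')
--     return [groups.get(j, []) for j in range(qubits_num)]
-- ===== Notes on version B (the rewrite author's own statement) =====
-- stated objective: alternative
-- what changed: replaces the N strided string slices (one per qubit) by a single left-to-right pass over the concatenated readout string that buckets each character into group i % qubits_num of a dict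
import Mathlib
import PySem

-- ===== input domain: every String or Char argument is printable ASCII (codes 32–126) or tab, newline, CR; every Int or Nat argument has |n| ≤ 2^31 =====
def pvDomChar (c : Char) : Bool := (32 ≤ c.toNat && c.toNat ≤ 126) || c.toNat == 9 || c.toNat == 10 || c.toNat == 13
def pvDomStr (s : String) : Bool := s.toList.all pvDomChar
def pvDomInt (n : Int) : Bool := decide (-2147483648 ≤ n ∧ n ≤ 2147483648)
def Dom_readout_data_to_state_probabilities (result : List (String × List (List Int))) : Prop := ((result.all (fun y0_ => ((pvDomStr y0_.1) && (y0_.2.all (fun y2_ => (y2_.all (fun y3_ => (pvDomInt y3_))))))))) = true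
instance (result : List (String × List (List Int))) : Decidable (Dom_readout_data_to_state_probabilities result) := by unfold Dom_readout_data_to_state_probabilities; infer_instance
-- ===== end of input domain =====

-- B replaces A's per-qubit strided string slices by ONE pass over the concatenated readout
-- string bucketing each character into group (index % qubits_num) of a dict.

-- ===== PORT A =====
-- A: state01 = result.get('resultStatus'); basis_content = join of str(s) over rows state01[1:];
-- for idx in range(len(state01[0])): append [c == '1' for c in basis_content[idx : len : qubits_num]].
def readout_data_to_state_probabilities (result : List (String × List (List Int))) : List (List Bool) :=
  match List.lookup "resultStatus" result with
  | none => []          -- Python: TypeError on None[1:]; excluded by Pre_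
  | some state01 =>
    match state01 with
    | [] => []          -- Python: IndexError on state01[0]; excluded by Pre_
    | first :: _ =>
      let basisContent : List Char :=
        (PySem.List.slice state01 (some 1) none).flatMap
          (fun state => state.flatMap (fun s => PySem.Int.toChars s))
      let qubitsNum : Nat := first.length
      (PySem.List.pyRange 0 (qubitsNum : Int) 1).foldl
        (fun basisList idx =>
          let basisResult : List Char :=
            (PySem.List.slice? basisContent (some idx) (some (basisContent.length : Int)) (qubitsNum : Int)).getD []
          basisList ++ [basisResult.map (fun res => if res = '1' then true else false)])
        []

-- ===== PORT B =====
-- B: one pass over enumerate(basis_content) appending (ch == '1') to groups[i % qubits_num]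
-- (a dict, setdefault = Dict.modify with default []), then read groups 0 .. qubits_num-1.
def readout_data_to_state_probabilities_alt (result : List (String × List (List Int))) : List (List Bool) :=
  match List.lookup "resultStatus" result with
  | none => []          -- Python: TypeError on None[0]; excluded by Pre_
  | some state01 =>
    match state01 with
    | [] => []          -- Python: IndexError on state01[0]; excluded by Pre_
    | first :: _ =>
      let qubitsNum : Nat := first.length
      let basisContent : List Char :=
        (PySem.List.slice state01 (some 1) none).flatMap
          (fun row => row.flatMap (fun s => PySem.Int.toChars s))
      let groups : PySem.Dict Int (List Bool) :=
        if qubitsNum = 0 then PySem.Dict.empty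
        else (PySem.List.enumerate basisContent 0).foldl
          (fun d p => d.modify (PySem.Int.mod p.1 (qubitsNum : Int)) [] (· ++ [p.2 == '1']))
          PySem.Dict.empty
      (PySem.List.pyRange 0 (qubitsNum : Int) 1).map (fun j => groups.getD j [])

-- ===== PRECONDITION & SPEC =====
-- Pre_ excludes exactly the inputs where A raises: a missing 'resultStatus' key (TypeError on
-- None) and an empty resultStatus list (IndexError on state01[0]).
def Pre_readout_data_to_state_probabilities (result : List (String × List (List Int))) : Prop :=
  (List.lookup "resultStatus" result).getD [] ≠ []
instance (result : List (String × List (List Int))) : Decidable (Pre_readout_data_to_state_probabilities result) := by unfold Pre_readout_data_to_state_probabilities; infer_instance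

def pvWitness_readout_data_to_state_probabilities : (List (String × List (List Int))) :=
  [("resultStatus", [[0, 1], [0, 1], [1, 1]])]

def Spec_readout_data_to_state_probabilities (result : List (String × List (List Int))) (out : List (List Bool)) : Prop := out = readout_data_to_state_probabilities_alt result
instance (result : List (String × List (List Int))) (out : List (List Bool)) : Decidable (Spec_readout_data_to_state_probabilities result out) := by unfold Spec_readout_data_to_state_probabilities; infer_instance

-- ===== CLAIM (what is proved, stated in full; the proofs are below) =====
def Claim_equal_readout_data_to_state_probabilities : Prop := ∀ (result : List (String × List (List Int))), Dom_readout_data_to_state_probabilities result → Pre_readout_data_to_state_probabilities result → Spec_readout_data_to_state_probabilities result (readout_data_to_state_probabilities result)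

-- ===== LEMMAS AND PROOFS =====

-- Count of i < n with i % q = j, as A's slice count computes it.
-- The indices < n congruent to j mod q, in order.
lemma range_filter_mod (q j : Nat) (hq : 0 < q) (hj : j < q) (n : Nat) :
    (List.range n).filter (fun i => decide (i % q = j))
      = (List.range ((n - j + q - 1) / q)).map (fun k => j + q * k) := by
  induction n with
  | zero =>
    rw [show (0 - j + q - 1) / q = 0 from Nat.div_eq_of_lt (by omega)]
    simp
  | succ n ih =>
    rw [List.range_succ, List.filter_append, ih]
    have hdm := Nat.div_add_mod n q
    have hml : n % q < q := Nat.mod_lt _ hq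
    by_cases h : n % q = j
    · obtain ⟨m, hmt⟩ : ∃ m, q * (n / q) = m := ⟨_, rfl⟩
      rw [hmt] at hdm
      have e1 : n + 1 - j + q - 1 = q * (n / q) + q := by rw [hmt]; omega
      have e2 : n - j + q - 1 = q * (n / q) + (q - 1) := by rw [hmt]; omega
      have e0 : n = j + q * (n / q) := by rw [hmt]; omega
      rw [e1, e2, Nat.mul_add_div hq, Nat.mul_add_div hq, Nat.div_self hq,
        Nat.div_eq_of_lt (show q - 1 < q by omega), List.range_succ, List.map_append]
      simp [h]
      exact e0
    · have h3 : (n + 1 - j + q - 1) / q = (n - j + q - 1) / q := by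
        by_cases hnj : n < j
        · rw [show n + 1 - j + q - 1 = n - j + q - 1 by omega]
        · have hdm2 := Nat.div_add_mod (n - j) q
          have hml2 : (n - j) % q < q := Nat.mod_lt _ hq
          obtain ⟨m, hmt⟩ : ∃ m, q * ((n - j) / q) = m := ⟨_, rfl⟩
          obtain ⟨r, hrt⟩ : ∃ r, (n - j) % q = r := ⟨_, rfl⟩
          rw [hmt, hrt] at hdm2
          rw [hrt] at hml2
          have hr0 : r ≠ 0 := by
            intro hr
            apply h
            have hn : n = j + q * ((n - j) / q) := by rw [hmt]; omega
            rw [hn, Nat.add_mul_mod_self_left, Nat.mod_eq_of_lt hj]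
          have ea : n + 1 - j + q - 1 = q * ((n - j) / q) + (q * 1 + r) := by
            rw [hmt]; omega
          have eb : n - j + q - 1 = q * ((n - j) / q) + (q * 1 + (r - 1)) := by
            rw [hmt]; omega
          rw [ea, eb, Nat.mul_add_div hq, Nat.mul_add_div hq, Nat.mul_add_div hq,
            Nat.mul_add_div hq, Nat.div_eq_of_lt hml2,
            Nat.div_eq_of_lt (show r - 1 < q by omega)]
      rw [h3]
      simp [h]

lemma mem_stride_lt (q j n k : Nat) (hq : 0 < q) (hj : j < q)
    (hk : k < (n - j + q - 1) / q) : j + q * k < n := by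
  have h := range_filter_mod q j hq hj n
  have : j + q * k ∈ (List.range ((n - j + q - 1) / q)).map (fun k => j + q * k) :=
    List.mem_map.2 ⟨k, List.mem_range.2 hk, rfl⟩
  rw [← h] at this
  exact List.mem_range.1 (List.mem_of_mem_filter this)

-- A's strided slice, unfolded.
lemma sliceA (xs : List Char) (q j : Nat) (hq : 0 < q) :
    PySem.List.slice? xs (some (j : Int)) (some (xs.length : Int)) (q : Int)
      = some ((List.range ((xs.length - j + q - 1) / q)).filterMap (fun k => xs[j + q * k]?)) := by
  have hq' : (q : Int) ≠ 0 := by omega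
  unfold PySem.List.slice? PySem.List.sliceIndices
  rw [if_neg hq']
  simp only [show ¬((q:Int) < 0) by omega, if_false, show ¬((j:Int) < 0) by omega,
    show ¬((xs.length:Int) < 0) by omega, if_pos (show 0 < (q:Int) by omega)]
  rw [min_self]
  by_cases hjn : j < xs.length
  · rw [min_eq_left (by exact_mod_cast Nat.le_of_lt hjn), if_pos (by exact_mod_cast hjn),
      show ((xs.length:Int) - j + q - 1) = ((xs.length - j + q - 1 : Nat) : Int) by omega,
      ← Int.natCast_div, Int.toNat_natCast]
    have hidx : ∀ x : Nat, (((j:Int) + q * x)).toNat = j + q * x := by intro x; omega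
    simp [hidx]
  · rw [min_eq_right (by exact_mod_cast Nat.le_of_not_lt hjn), if_neg (by omega),
      show xs.length - j + q - 1 = q - 1 by omega, Nat.div_eq_of_lt (by omega)]
    simp

-- A's bucket j equals the ordered picks at indices ≡ j (mod q).
lemma bucketA_eq (xs : List Char) (q j : Nat) (hq : 0 < q) (hj : j < q) :
    ((PySem.List.slice? xs (some (j : Int)) (some (xs.length : Int)) (q : Int)).getD []).map
        (fun res => if res = '1' then true else false)
      = ((List.range xs.length).filter (fun i => decide (i % q = j))).map
          (fun i => decide (xs.getD i ' ' = '1')) := by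
  rw [sliceA xs q j hq, Option.getD_some]
  have hfm : (List.range ((xs.length - j + q - 1) / q)).filterMap (fun k => xs[j + q * k]?)
      = (List.range ((xs.length - j + q - 1) / q)).map (fun k => xs.getD (j + q * k) ' ') := by
    rw [List.filterMap_congr (g := fun k => some (xs.getD (j + q * k) ' ')) ?_]
    · exact congrFun List.filterMap_eq_map _
    · intro k hk
      have hlt : j + q * k < xs.length := mem_stride_lt q j xs.length k hq hj (List.mem_range.1 hk)
      simp only []
      rw [List.getElem?_eq_getElem hlt, List.getD_eq_getElem _ _ hlt]
  rw [hfm, range_filter_mod q j hq hj, List.map_map, List.map_map]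
  apply List.map_congr_left
  intro k _
  simp only [Function.comp_def]
  simp

-- B's bucket j equals the same list.
lemma bucketB_eq (xs : List Char) (q j : Nat) :
    (((PySem.List.enumerate xs 0).foldl
        (fun d p => d.modify (PySem.Int.mod p.1 (q : Int)) [] (· ++ [p.2 == '1']))
        PySem.Dict.empty).getD (j : Int) [])
      = ((List.range xs.length).filter (fun i => decide (i % q = j))).map
          (fun i => decide (xs.getD i ' ' = '1')) := by
  have hmap : (PySem.List.enumerate xs 0).foldl
        (fun d p => d.modify (PySem.Int.mod p.1 (q : Int)) [] (· ++ [p.2 == '1']))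
        (PySem.Dict.empty : PySem.Dict Int (List Bool))
      = ((PySem.List.enumerate xs 0).map
          (fun p => (PySem.Int.mod p.1 (q : Int), p.2 == '1'))).foldl
          (fun d p => d.modify p.1 [] (· ++ [p.2])) PySem.Dict.empty := by
    rw [List.foldl_map]
  rw [hmap, PySem.Dict.getD_foldl_modify_append]
  rw [PySem.List.enumerate_eq_map_pyRange xs ' ']
  rw [PySem.List.pyRange_one]
  simp [List.filter_map, List.map_map, Function.comp_def]
  have hp : (fun x : Nat => ((x : Int) % (q : Int) == (j : Int)))
      = (fun i : Nat => decide (i % q = j)) := by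
    funext k; rw [← Int.natCast_mod]; by_cases h : k % q = j
    · simp [h]
    · simp [h]
      omega
  have hf : (fun x : Nat => (xs[x]?.getD ' ' == '1'))
      = (fun i : Nat => decide (xs[i]?.getD ' ' = '1')) := by
    funext k; by_cases h : xs[k]?.getD ' ' = '1' <;> simp [h]
  rw [hp, hf]

-- ===== VERDICT (by name: the statement is the Claim_ definition above) =====
theorem readout_data_to_state_probabilities_spec : Claim_equal_readout_data_to_state_probabilities := by
  intro result _ hpre
  unfold Spec_readout_data_to_state_probabilities
  unfold readout_data_to_state_probabilities readout_data_to_state_probabilities_alt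
  unfold Pre_readout_data_to_state_probabilities at hpre
  cases hlk : List.lookup "resultStatus" result with
  | none => simp [hlk] at hpre
  | some state01 =>
    cases state01 with
    | nil => simp [hlk] at hpre
    | cons first rest =>
      simp only
      by_cases hq0 : first.length = 0
      · simp [hq0]
      · have hq : 0 < first.length := Nat.pos_of_ne_zero hq0
        rw [if_neg hq0]
        rw [PySem.List.foldl_append_singleton_eq_map]
        rw [PySem.List.pyRange_one]
        simp only [sub_zero, Int.toNat_natCast, List.map_map]
        apply List.map_congr_left
        intro k hk
        have hk' : k < first.length := List.mem_range.1 hk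
        simp only [Function.comp, zero_add]
        rw [bucketA_eq _ _ _ hq hk', bucketB_eq]
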